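-- pv_equiv track=rewrite | github.com/dujodujo/lemur | Programiranje/dn - oddaja/kronogram.py | kronogram
-- ===== SOURCE A (Python) =====
-- ly = ("CVIVS IN HOC RENOVATA LOCO PIA FVLGET IMAGO SIS CVSTOS POPVLI SANCTE IACOBE TVI")
--
-- def kronogram(ly):
--     vrednosti = (1, 5, 10, 50, 100, 500, 1000)
--     imena = ("I", "V", "X", "L", "C", "D", "M")
--     vsota =0
--     for y in ly:
--         for ime, vrednost in zip(imena, vrednosti):
--             if y in ime:
--                 vsota +=vrednost
--     return vsota
-- ===== SOURCE B (Python) =====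
-- def kronogram(ly):
--     counts = {}
--     for y in ly:
--         counts[y] = counts.get(y, 0) + 1
--     total = 0
--     for sym, val in (("I", 1), ("V", 5), ("X", 10), ("L", 50),
--                      ("C", 100), ("D", 500), ("M", 1000)):
--         total += counts.get(sym, 0) * val
--     return total
-- ===== Notes on version B (the rewrite author's own statement) =====
-- stated objective: faster
-- what changed: Instead of testing each input character against the seven Roman symbols in a nested loop, B builds a character-frequency dict in one pass and then does a fixed 7-iteration pass over the symbol/value table, accumulating count*value.
import Mathlib
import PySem

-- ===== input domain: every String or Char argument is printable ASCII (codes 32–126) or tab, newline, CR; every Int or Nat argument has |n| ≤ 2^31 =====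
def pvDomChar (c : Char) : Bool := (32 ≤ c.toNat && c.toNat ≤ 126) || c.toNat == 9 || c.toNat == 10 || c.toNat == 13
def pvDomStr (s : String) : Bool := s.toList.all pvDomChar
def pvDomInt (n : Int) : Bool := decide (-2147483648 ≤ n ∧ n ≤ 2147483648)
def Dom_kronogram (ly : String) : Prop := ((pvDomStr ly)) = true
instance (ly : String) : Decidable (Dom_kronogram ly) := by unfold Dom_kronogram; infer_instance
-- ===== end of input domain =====

-- B replaces A's nested per-character scan of the symbol table by a frequency dict
-- built once plus a fixed 7-step pass over the symbol/value table (alternative decomposition).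

-- ===== PORT A =====
-- `y in ime` with `ime` a one-character string is exactly membership among its characters.
def kronogram (ly : String) : Int :=
  let vrednosti : List Int := [1, 5, 10, 50, 100, 500, 1000]
  let imena : List String := ["I", "V", "X", "L", "C", "D", "M"]
  ly.toList.foldl (fun vsota y =>
    (imena.zip vrednosti).foldl
      (fun v p => if y ∈ p.1.toList then v + p.2 else v) vsota) 0

-- ===== PORT B =====
def kronogram_alt (ly : String) : Int :=
  let counts : PySem.Dict Char Int :=
    ly.toList.foldl (fun d y => d.insert y (d.getD y 0 + 1)) PySem.Dict.empty
  [('I', (1 : Int)), ('V', 5), ('X', 10), ('L', 50), ('C', 100), ('D', 500), ('M', 1000)].foldl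
    (fun total p => total + counts.getD p.1 0 * p.2) 0

-- ===== PRECONDITION & SPEC =====
def Spec_kronogram (ly : String) (out : Int) : Prop := out = kronogram_alt ly
instance (ly : String) (out : Int) : Decidable (Spec_kronogram ly out) := by unfold Spec_kronogram; infer_instance

-- ===== CLAIM (what is proved, stated in full; the proofs are below) =====
def Claim_equal_kronogram : Prop := ∀ (ly : String), Dom_kronogram ly → Spec_kronogram ly (kronogram ly)

-- ===== LEMMAS AND PROOFS =====
-- Roman value of a single character (0 for non-symbols).
def pvCharVal (y : Char) : Int :=
  if y = 'I' then 1 else if y = 'V' then 5 else if y = 'X' then 10 else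
  if y = 'L' then 50 else if y = 'C' then 100 else if y = 'D' then 500 else
  if y = 'M' then 1000 else 0

-- A's inner loop over the zipped symbol table adds exactly the character's Roman value.
theorem kronogram_inner (y : Char) (v : Int) :
    ((["I", "V", "X", "L", "C", "D", "M"] : List String).zip
      ([1, 5, 10, 50, 100, 500, 1000] : List Int)).foldl
      (fun v p => if y ∈ p.1.toList then v + p.2 else v) v
    = v + pvCharVal y := by
  simp only [List.zip_cons_cons, List.zip_nil_right, List.foldl_cons, List.foldl_nil,
    show ("I" : String).toList = ['I'] from rfl, show ("V" : String).toList = ['V'] from rfl,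
    show ("X" : String).toList = ['X'] from rfl, show ("L" : String).toList = ['L'] from rfl,
    show ("C" : String).toList = ['C'] from rfl, show ("D" : String).toList = ['D'] from rfl,
    show ("M" : String).toList = ['M'] from rfl, List.mem_singleton, pvCharVal]
  split_ifs <;> simp_all

-- A's outer loop accumulates the per-character values.
theorem kronogram_fold (l : List Char) (a : Int) :
    l.foldl (fun vsota y =>
      ((["I", "V", "X", "L", "C", "D", "M"] : List String).zip
        ([1, 5, 10, 50, 100, 500, 1000] : List Int)).foldl
        (fun v p => if y ∈ p.1.toList then v + p.2 else v) vsota) a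
    = a + (l.map pvCharVal).sum := by
  induction l generalizing a with
  | nil => simp
  | cons y t ih =>
    rw [List.foldl_cons, kronogram_inner, ih, List.map_cons, List.sum_cons]
    ring

-- The 7-term count*value sum equals the per-character value sum.
theorem kronogram_counts (l : List Char) :
    (l.count 'I' : Int) * 1 + (l.count 'V' : Int) * 5 + (l.count 'X' : Int) * 10
      + (l.count 'L' : Int) * 50 + (l.count 'C' : Int) * 100 + (l.count 'D' : Int) * 500
      + (l.count 'M' : Int) * 1000
    = (l.map pvCharVal).sum := by
  induction l with
  | nil => simp
  | cons y t ih =>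
    simp only [List.count_cons, List.map_cons, List.sum_cons, beq_iff_eq, pvCharVal] at *
    split_ifs with h1 h2 h3 h4 h5 h6 h7 <;> subst_eqs <;> simp <;> omega

-- ===== VERDICT (by name: the statement is the Claim_ definition above) =====
theorem kronogram_spec : Claim_equal_kronogram := by
  intro ly _
  unfold Spec_kronogram kronogram kronogram_alt
  rw [kronogram_fold]
  simp only [List.foldl_cons, List.foldl_nil, PySem.Dict.getD_foldl_insert_add_one,
    PySem.Dict.getD_empty]
  rw [← kronogram_counts]
  ring
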